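-- pv_equiv track=rewrite | github.com/baylina/dmander | database.py | _supplier_offer_status_counts
-- ===== SOURCE A (Python) =====
-- from typing import Any, Optional
--
-- def _supplier_offer_status_counts(offers: list[dict[str, Any]]) -> dict[str, int]:
--     counts = {"visible": 0, "pinned": 0, "hidden": 0, "all": len(offers)}
--     for offer in offers:
--         hidden = bool(offer.get("supplier_hidden"))
--         pinned = bool(offer.get("supplier_is_pinned"))
--         if hidden:
--             counts["hidden"] += 1
--         else:
--             counts["visible"] += 1
--             if pinned:
--                 counts["pinned"] += 1
--     return counts
-- ===== SOURCE B (Python) =====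
-- def _supplier_offer_status_counts(offers):
--     total = len(offers)
--     hidden = sum(1 for o in offers if o.get("supplier_hidden"))
--     pinned = sum(1 for o in offers
--                  if not o.get("supplier_hidden") and o.get("supplier_is_pinned"))
--     return {"visible": total - hidden, "pinned": pinned, "hidden": hidden, "all": total}
-- ===== Notes on version B (the rewrite author's own statement) =====
-- stated objective: simpler
-- what changed: Replaces the single branching stateful loop over a counts dict by independent filtered sums (hidden, pinned-among-visible) and derives visible arithmetically as total - hidden.
import Mathlib
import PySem

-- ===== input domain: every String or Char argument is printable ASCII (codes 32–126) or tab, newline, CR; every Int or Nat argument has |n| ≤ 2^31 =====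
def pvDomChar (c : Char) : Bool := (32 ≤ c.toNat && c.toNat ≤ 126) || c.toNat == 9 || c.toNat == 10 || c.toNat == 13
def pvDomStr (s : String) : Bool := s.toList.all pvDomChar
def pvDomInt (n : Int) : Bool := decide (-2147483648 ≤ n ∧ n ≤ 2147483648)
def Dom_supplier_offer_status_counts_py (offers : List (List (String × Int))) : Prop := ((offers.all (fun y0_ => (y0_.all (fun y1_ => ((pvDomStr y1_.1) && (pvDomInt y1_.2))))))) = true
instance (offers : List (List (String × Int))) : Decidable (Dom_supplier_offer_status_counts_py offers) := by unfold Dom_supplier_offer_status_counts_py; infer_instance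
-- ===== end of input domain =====

-- B replaces A's single branching stateful loop by independent filtered counts and visible = total - hidden (objective: simpler).

-- ===== PORT A =====
-- bool(offer.get(k)) for an int-valued dict: missing key or 0 is False, any other int is True
def pvTruthy (o : Option Int) : Bool :=
  match o with
  | none => false
  | some n => n != 0

def supplier_offer_status_counts_py (offers : List (List (String × Int))) : List (String × Int) :=
  let counts : PySem.Dict String Int :=
    PySem.Dict.ofList [("visible", 0), ("pinned", 0), ("hidden", 0), ("all", (offers.length : Int))]
  let counts := offers.foldl (fun c offer =>
    let hidden := pvTruthy ((PySem.Dict.mk offer).get? "supplier_hidden")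
    let pinned := pvTruthy ((PySem.Dict.mk offer).get? "supplier_is_pinned")
    if hidden then
      c.modify "hidden" 0 (· + 1)
    else
      let c := c.modify "visible" 0 (· + 1)
      if pinned then c.modify "pinned" 0 (· + 1) else c) counts
  counts.items

-- ===== PORT B =====
def pvIsHidden (offer : List (String × Int)) : Bool :=
  pvTruthy ((PySem.Dict.mk offer).get? "supplier_hidden")

def pvIsPinnedVisible (offer : List (String × Int)) : Bool :=
  !pvIsHidden offer && pvTruthy ((PySem.Dict.mk offer).get? "supplier_is_pinned")

def supplier_offer_status_counts_py_alt (offers : List (List (String × Int))) : List (String × Int) :=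
  let total : Int := offers.length
  let hidden : Int := offers.countP pvIsHidden
  let pinned : Int := offers.countP pvIsPinnedVisible
  [("visible", total - hidden), ("pinned", pinned), ("hidden", hidden), ("all", total)]

-- ===== PRECONDITION & SPEC =====
def Spec_supplier_offer_status_counts_py (offers : List (List (String × Int))) (out : List (String × Int)) : Prop := out = supplier_offer_status_counts_py_alt offers
instance (offers : List (List (String × Int))) (out : List (String × Int)) : Decidable (Spec_supplier_offer_status_counts_py offers out) := by unfold Spec_supplier_offer_status_counts_py; infer_instance

-- ===== CLAIM (what is proved, stated in full; the proofs are below) =====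
def Claim_equal_supplier_offer_status_counts_py : Prop := ∀ (offers : List (List (String × Int))), Dom_supplier_offer_status_counts_py offers → Spec_supplier_offer_status_counts_py offers (supplier_offer_status_counts_py offers)

-- ===== LEMMAS AND PROOFS =====

-- loop invariant for A's fold: starting from the four-key counts dict, the fold adds the
-- per-category counts of the remaining offers to the current values and leaves "all" alone
theorem pv_fold_counts (offers : List (List (String × Int))) (v p h a : Int) :
    (offers.foldl (fun c offer =>
        let hidden := pvTruthy ((PySem.Dict.mk offer).get? "supplier_hidden")
        let pinned := pvTruthy ((PySem.Dict.mk offer).get? "supplier_is_pinned")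
        if hidden then
          c.modify "hidden" 0 (· + 1)
        else
          let c := c.modify "visible" 0 (· + 1)
          if pinned then c.modify "pinned" 0 (· + 1) else c)
      (PySem.Dict.mk [("visible", v), ("pinned", p), ("hidden", h), ("all", a)])).items
    = [("visible", v + (offers.countP (fun o => !pvIsHidden o) : Int)),
       ("pinned", p + (offers.countP pvIsPinnedVisible : Int)),
       ("hidden", h + (offers.countP pvIsHidden : Int)),
       ("all", a)] := by
  induction offers generalizing v p h a with
  | nil => simp
  | cons o rest ih =>
    simp only [List.foldl_cons]
    by_cases hh : pvIsHidden o
    · have : pvTruthy ((PySem.Dict.mk o).get? "supplier_hidden") = true := hh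
      simp only [this, if_true]
      have hstep : (PySem.Dict.mk [("visible", v), ("pinned", p), ("hidden", h), ("all", a)]).modify "hidden" 0 (· + 1)
          = PySem.Dict.mk [("visible", v), ("pinned", p), ("hidden", h + 1), ("all", a)] := by
        simp [PySem.Dict.modify, PySem.Dict.getD, PySem.Dict.get?, PySem.Dict.contains, PySem.Dict.insert]
      rw [hstep, ih]
      simp [hh, pvIsPinnedVisible]
      omega
    · have : pvTruthy ((PySem.Dict.mk o).get? "supplier_hidden") = false := by
        simpa [pvIsHidden] using hh
      simp only [this, if_false, Bool.false_eq_true]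
      have hstep : (PySem.Dict.mk [("visible", v), ("pinned", p), ("hidden", h), ("all", a)]).modify "visible" 0 (· + 1)
          = PySem.Dict.mk [("visible", v + 1), ("pinned", p), ("hidden", h), ("all", a)] := by
        simp [PySem.Dict.modify, PySem.Dict.getD, PySem.Dict.get?, PySem.Dict.contains, PySem.Dict.insert]
      by_cases hp : pvTruthy ((PySem.Dict.mk o).get? "supplier_is_pinned")
      · have hstep2 : (PySem.Dict.mk [("visible", v + 1), ("pinned", p), ("hidden", h), ("all", a)]).modify "pinned" 0 (· + 1)
            = PySem.Dict.mk [("visible", v + 1), ("pinned", p + 1), ("hidden", h), ("all", a)] := by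
          simp [PySem.Dict.modify, PySem.Dict.getD, PySem.Dict.get?, PySem.Dict.contains, PySem.Dict.insert]
        simp only [hp, if_true, hstep, hstep2, ih]
        have hpv : pvIsPinnedVisible o = true := by simp [pvIsPinnedVisible, hh, hp]
        simp [hh, hpv]
        omega
      · simp only [hp, Bool.false_eq_true, if_false, hstep, ih]
        have hpv : pvIsPinnedVisible o = false := by simp [pvIsPinnedVisible, hp]
        simp [hh, hpv]
        omega

-- ===== VERDICT (by name: the statement is the Claim_ definition above) =====
theorem supplier_offer_status_counts_py_spec : Claim_equal_supplier_offer_status_counts_py := by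
  intro offers _
  show supplier_offer_status_counts_py offers = supplier_offer_status_counts_py_alt offers
  unfold supplier_offer_status_counts_py supplier_offer_status_counts_py_alt
  have hof : PySem.Dict.ofList [("visible", (0:Int)), ("pinned", 0), ("hidden", 0), ("all", (offers.length : Int))]
      = PySem.Dict.mk [("visible", 0), ("pinned", 0), ("hidden", 0), ("all", (offers.length : Int))] := by
    simp [PySem.Dict.ofList, PySem.Dict.update, PySem.Dict.insert, PySem.Dict.empty]
  simp only [hof, pv_fold_counts]
  have hcount : (offers.countP (fun o => !pvIsHidden o) : Int)
      = (offers.length : Int) - (offers.countP pvIsHidden : Int) := by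
    have h1 := List.length_eq_countP_add_countP pvIsHidden (l := offers)
    have h2 : offers.countP (fun a => decide ¬ pvIsHidden a = true) = offers.countP (fun o => !pvIsHidden o) := by
      apply List.countP_congr; intro x _; simp
    omega
  simp [hcount]
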